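-- pv_equiv track=rewrite | github.com/krnets/codewars-practice | 6kyu/Upside down numbers/kata.py | is_upside_down
-- ===== SOURCE A (Python) =====
-- def is_upside_down(num):
--     if num < 10:
--         return num in (0, 1, 8)
--     m = num
--     while m:
--         m, r = divmod(m, 10)
--         if r in (2, 3, 4, 5, 7):
--             return False
--     return (s := str(num))[::-1] == s.translate(str.maketrans("69", "96"))
-- ===== SOURCE B (Python) =====
-- def is_upside_down(num):
--     # Integer-only: rebuild the number read upside down via divmod and compare.
--     if num < 0:
--         return False
--     flip = {0: 0, 1: 1, 8: 8, 6: 9, 9: 6}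
--     m, rev = num, 0
--     while True:
--         m, d = divmod(m, 10)
--         if d not in flip:
--             return False
--         rev = rev * 10 + flip[d]
--         if m == 0:
--             break
--     return rev == num
-- ===== Notes on version B (the rewrite author's own statement) =====
-- stated objective: alternative
-- what changed: Replaced A's two-phase check (digit-validation divmod loop, then build str(num), reverse it and compare with a translated copy) by a single integer-only divmod loop that rebuilds the upside-down number with a digit flip map and compares it to num; no strings at all.
import Mathlib
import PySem

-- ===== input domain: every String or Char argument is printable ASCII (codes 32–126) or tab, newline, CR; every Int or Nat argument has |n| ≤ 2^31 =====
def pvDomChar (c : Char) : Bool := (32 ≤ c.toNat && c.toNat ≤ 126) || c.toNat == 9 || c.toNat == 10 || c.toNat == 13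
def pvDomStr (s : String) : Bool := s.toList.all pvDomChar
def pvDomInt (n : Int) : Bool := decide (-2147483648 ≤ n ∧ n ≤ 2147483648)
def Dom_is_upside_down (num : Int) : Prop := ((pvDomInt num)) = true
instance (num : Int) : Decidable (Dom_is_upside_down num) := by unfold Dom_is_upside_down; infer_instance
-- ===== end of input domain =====

-- B replaces A's validation loop + string reverse/translate compare by a single integer
-- divmod loop that rebuilds the upside-down number; alternative decomposition, no speed claim.

-- ===== PORT A =====
-- `r in (2,3,4,5,7)` check inside A's while loop
def pvBad (r : Nat) : Bool := r == 2 || r == 3 || r == 4 || r == 5 || r == 7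

-- A's `while m: m, r = divmod(m, 10); if r in (2,3,4,5,7): return False`.
-- m stays ≥ 0 here (the loop only runs when num ≥ 10), so Nat % / match Python divmod.
def pvALoop (m : Nat) : Bool :=
  if h : m = 0 then true
  else if pvBad (m % 10) then false
  else pvALoop (m / 10)
termination_by m
decreasing_by exact Nat.div_lt_self (Nat.pos_of_ne_zero h) (by norm_num)

-- str.maketrans("69", "96") applied charwise by str.translate
def pvSwap69 (c : Char) : Char := if c = '6' then '9' else if c = '9' then '6' else c

def is_upside_down (num : Int) : Bool :=
  if num < 10 then (num == 0 || num == 1 || num == 8)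
  else if pvALoop num.toNat then
    -- s := str(num); s[::-1] == s.translate(...): string equality = char-list equality,
    -- s[::-1] is List.reverse on the chars
    let s := PySem.Int.toChars num
    s.reverse == s.map pvSwap69
  else false

-- ===== PORT B =====
-- the dict lookup `flip.get(d)` for flip = {0:0, 1:1, 8:8, 6:9, 9:6}
def pvFlip? (d : Nat) : Option Nat :=
  match d with
  | 0 => some 0 | 1 => some 1 | 8 => some 8 | 6 => some 9 | 9 => some 6
  | _ => none

-- B's do-while: m, d = divmod(m, 10); fail on unflippable d; rev = rev*10 + flip[d]; stop at m == 0.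
-- m stays ≥ 0 (B returns early for num < 0), so Nat % / match Python divmod.
def pvBLoop (m : Nat) (rev : Int) : Option Int :=
  match pvFlip? (m % 10) with
  | none => none
  | some f =>
    let rev' := rev * 10 + (f : Int)
    if h : m / 10 = 0 then some rev'
    else pvBLoop (m / 10) rev'
termination_by m
decreasing_by
  exact Nat.div_lt_self (Nat.pos_of_ne_zero (fun e => h (by simp [e]))) (by norm_num)

def is_upside_down_alt (num : Int) : Bool :=
  if num < 0 then false
  else
    match pvBLoop num.toNat 0 with
    | none => false
    | some rev => rev == num

-- ===== PRECONDITION & SPEC =====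
def Spec_is_upside_down (num : Int) (out : Bool) : Prop := out = is_upside_down_alt num
instance (num : Int) (out : Bool) : Decidable (Spec_is_upside_down num out) := by unfold Spec_is_upside_down; infer_instance

-- ===== CLAIM (what is proved, stated in full; the proofs are below) =====
def Claim_equal_is_upside_down : Prop := ∀ (num : Int), Dom_is_upside_down num → Spec_is_upside_down num (is_upside_down num)

-- ===== LEMMAS AND PROOFS =====

def pvFlipN (d : Nat) : Nat := (pvFlip? d).getD 0

theorem pvToDigitsCore_eq (f : Nat) : ∀ (n : Nat) (l : List Char), n < f → 0 < n →
    Nat.toDigitsCore 10 f n l = ((Nat.digits 10 n).map Nat.digitChar).reverse ++ l := by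
  induction f with
  | zero => intro n l h; omega
  | succ f ih =>
    intro n l hf hn
    have hd := Nat.digits_def' (b := 10) (by norm_num) hn
    simp only [Nat.toDigitsCore]
    by_cases h0 : n / 10 = 0
    · simp [h0, hd]
    · have hlt : n / 10 < n := Nat.div_lt_self hn (by norm_num)
      rw [if_neg h0, ih (n / 10) _ (by omega) (Nat.pos_of_ne_zero h0), hd]
      simp

theorem pvToDigits_eq (n : Nat) (hn : 0 < n) :
    Nat.toDigits 10 n = ((Nat.digits 10 n).map Nat.digitChar).reverse := by
  have := pvToDigitsCore_eq (n + 1) n [] (by omega) hn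
  simpa [Nat.toDigits] using this

theorem pvALoop_eq (n : Nat) : pvALoop n = (Nat.digits 10 n).all (fun d => !pvBad d) := by
  induction n using Nat.strong_induction_on with
  | _ n ih =>
    by_cases h : n = 0
    · simp [h, pvALoop]
    · have hn : 0 < n := Nat.pos_of_ne_zero h
      rw [pvALoop, Nat.digits_def' (b := 10) (by norm_num) hn]
      rw [ih (n / 10) (Nat.div_lt_self hn (by norm_num))]
      by_cases hb : pvBad (n % 10) = true <;> simp [h, hb]

theorem pvBLoop_eq (n : Nat) : ∀ (rev : Int), 0 < n →
    pvBLoop n rev =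
      (if (Nat.digits 10 n).all (fun d => (pvFlip? d).isSome) then
        some (rev * 10 ^ (Nat.digits 10 n).length +
          ((Nat.ofDigits 10 (((Nat.digits 10 n).map pvFlipN).reverse) : Nat) : Int))
      else none) := by
  induction n using Nat.strong_induction_on with
  | _ n ih =>
    intro rev hn
    have hd := Nat.digits_def' (b := 10) (by norm_num) hn
    rw [pvBLoop]
    rcases hF : pvFlip? (n % 10) with _ | f
    · simp [hd, hF]
    · have hfn : pvFlipN (n % 10) = f := by simp [pvFlipN, hF]
      by_cases h0 : n / 10 = 0
      · dsimp only
        rw [dif_pos h0, hd, h0, Nat.digits_zero]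
        simp [hF, hfn, Nat.ofDigits_singleton]
      · have hlt : n / 10 < n := Nat.div_lt_self hn (by norm_num)
        dsimp only
        rw [dif_neg h0, ih (n / 10) hlt _ (Nat.pos_of_ne_zero h0), hd]
        by_cases hall : (Nat.digits 10 (n / 10)).all (fun d => (pvFlip? d).isSome) = true
        · rw [if_pos hall, if_pos (by simp [hall, hF])]
          congr 1
          rw [List.map_cons, hfn, List.reverse_cons, Nat.ofDigits_append]
          simp only [Nat.ofDigits]
          push_cast
          simp only [List.length_cons, List.length_reverse, List.length_map, pow_succ]
          ring
        · rw [if_neg hall, if_neg (by simp [hall, hF])]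

theorem pvFlip_iff_not_bad : ∀ d : Nat, d < 10 → (pvFlip? d).isSome = !pvBad d := by decide

theorem pvDigitChar_inj : ∀ a : Nat, a < 10 → ∀ b : Nat, b < 10 →
    Nat.digitChar a = Nat.digitChar b → a = b := by decide

theorem pvSwap_digitChar : ∀ d : Nat, d < 10 → (pvFlip? d).isSome = true →
    pvSwap69 (Nat.digitChar d) = Nat.digitChar (pvFlipN d) := by decide

theorem pvFlipN_lt : ∀ d : Nat, d < 10 → pvFlipN d < 10 := by decide

theorem pvMap_digitChar_inj (l1 l2 : List Nat) (h1 : ∀ x ∈ l1, x < 10) (h2 : ∀ x ∈ l2, x < 10)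
    (h : l1.map Nat.digitChar = l2.map Nat.digitChar) : l1 = l2 := by
  induction l1 generalizing l2 with
  | nil => cases l2 <;> simp_all
  | cons a t ih =>
    cases l2 with
    | nil => simp_all
    | cons b t2 =>
      simp only [List.map_cons, List.cons.injEq] at h
      have ha := pvDigitChar_inj a (h1 a (by simp)) b (h2 b (by simp)) h.1
      have ht := ih t2 (fun x hx => h1 x (by simp [hx])) (fun x hx => h2 x (by simp [hx])) h.2
      simp [ha, ht]

theorem pvMain (num : Int) (h10 : 10 ≤ num) : is_upside_down num = is_upside_down_alt num := by
  set n := num.toNat with hn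
  have hnum : num = (n : Int) := by omega
  have hnp : 0 < n := by omega
  have hds : ∀ d ∈ Nat.digits 10 n, d < 10 := fun d hd => Nat.digits_lt_base (by norm_num) hd
  rw [is_upside_down, is_upside_down_alt, if_neg (show ¬ num < 10 by omega),
    if_neg (show ¬ num < 0 by omega)]
  rw [pvALoop_eq, pvBLoop_eq n 0 hnp]
  have hall_eq : (Nat.digits 10 n).all (fun d => !pvBad d)
      = (Nat.digits 10 n).all (fun d => (pvFlip? d).isSome) := by
    apply Bool.eq_iff_iff.mpr
    simp only [List.all_eq_true]
    constructor <;> intro h d hd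
    · rw [pvFlip_iff_not_bad d (hds d hd)]; exact h d hd
    · rw [← pvFlip_iff_not_bad d (hds d hd)]; exact h d hd
  rw [hall_eq]
  by_cases hall : (Nat.digits 10 n).all (fun d => (pvFlip? d).isSome) = true
  · rw [if_pos hall, if_pos hall]
    have hsome : ∀ d ∈ Nat.digits 10 n, (pvFlip? d).isSome = true := by
      intro d hd; exact List.all_eq_true.mp hall d hd
    -- A's string test
    have hchars : PySem.Int.toChars num = ((Nat.digits 10 n).map Nat.digitChar).reverse := by
      rw [PySem.Int.toChars, if_neg (by omega), hnum]
      simpa using pvToDigits_eq n hnp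
    have hmapswap : ((Nat.digits 10 n).map Nat.digitChar).map pvSwap69
        = ((Nat.digits 10 n).map pvFlipN).map Nat.digitChar := by
      rw [List.map_map, List.map_map]
      apply List.map_congr_left
      intro d hd
      exact pvSwap_digitChar d (hds d hd) (hsome d hd)
    have hA : (((PySem.Int.toChars num).reverse == (PySem.Int.toChars num).map pvSwap69) : Bool)
        = decide ((Nat.digits 10 n) = ((Nat.digits 10 n).map pvFlipN).reverse) := by
      rw [hchars, List.reverse_reverse, List.map_reverse, hmapswap]
      apply Bool.eq_iff_iff.mpr
      simp only [beq_iff_eq, decide_eq_true_eq]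
      constructor
      · intro h
        rw [← List.map_reverse] at h
        exact pvMap_digitChar_inj _ _ hds
          (fun x hx => by
            rcases List.mem_reverse.mp hx with hx'
            rcases List.mem_map.mp hx' with ⟨d, hd, rfl⟩
            exact pvFlipN_lt d (hds d hd)) h
      · intro h
        conv_lhs => rw [h]
        simp [List.map_reverse]
    -- B's numeric test
    have hflt : ∀ x ∈ ((Nat.digits 10 n).map pvFlipN).reverse, x < 10 := by
      intro x hx
      rcases List.mem_map.mp (List.mem_reverse.mp hx) with ⟨d, hd, rfl⟩
      exact pvFlipN_lt d (hds d hd)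
    have hB : ((0 * (10:Int) ^ (Nat.digits 10 n).length +
          ((Nat.ofDigits 10 (((Nat.digits 10 n).map pvFlipN).reverse) : Nat) : Int)) == num)
        = decide ((Nat.digits 10 n) = ((Nat.digits 10 n).map pvFlipN).reverse) := by
      apply Bool.eq_iff_iff.mpr
      simp only [beq_iff_eq, decide_eq_true_eq, zero_mul, zero_add]
      rw [hnum]
      constructor
      · intro h
        have hnat : Nat.ofDigits 10 (((Nat.digits 10 n).map pvFlipN).reverse)
            = Nat.ofDigits 10 (Nat.digits 10 n) := by
          rw [Nat.ofDigits_digits]; exact_mod_cast h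
        exact (Nat.ofDigits_inj_of_len_eq (by norm_num) (by simp) hflt hds hnat).symm
      · intro h
        rw [← h, Nat.ofDigits_digits]
    simp only [hA, hB]
  · rw [if_neg hall, if_neg hall]

-- ===== VERDICT (by name: the statement is the Claim_ definition above) =====
theorem is_upside_down_spec : Claim_equal_is_upside_down := by
  intro num _
  unfold Spec_is_upside_down
  by_cases h10 : 10 ≤ num
  · exact pvMain num h10
  · by_cases hneg : num < 0
    · rw [is_upside_down, is_upside_down_alt, if_pos (by omega), if_pos hneg]
      simp only [Bool.or_eq_false_iff, beq_eq_false_iff_ne]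
      refine ⟨⟨?_, ?_⟩, ?_⟩ <;> omega
    · have : num = 0 ∨ num = 1 ∨ num = 2 ∨ num = 3 ∨ num = 4 ∨ num = 5 ∨ num = 6 ∨
          num = 7 ∨ num = 8 ∨ num = 9 := by omega
      rcases this with rfl | rfl | rfl | rfl | rfl | rfl | rfl | rfl | rfl | rfl <;>
        simp [is_upside_down, is_upside_down_alt, pvBLoop, pvFlip?]
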